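-- pv_equiv track=rewrite | github.com/aws-samples/sample-agentic-attack-tree-generator | src/threatforest/modules/workflow/ttc_mappings/mitigation_enricher.py | enrich_mermaid
-- ===== SOURCE A (Python) =====
-- from typing import Dict, List, Any, Optional
--
-- def enrich_mermaid(mermaid_content: str, attack_tree: Dict[str, Any]) -> str:
--     """
--     Add mitigation nodes to Mermaid diagram
--
--     Args:
--         mermaid_content: Original Mermaid diagram content
--         attack_tree: Enriched attack tree with mitigation nodes
--
--     Returns:
--         Mermaid content with mitigation nodes
--     """
--     lines = mermaid_content.split('\n')
--     result = []
--
--     # Keep header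
--     for line in lines:
--         result.append(line)
--         if line.strip().startswith('graph'):
--             break
--
--     # Add all nodes including mitigations
--     node_map = {n['id']: n for n in attack_tree.get('nodes', [])}
--
--     for node in attack_tree.get('nodes', []):
--         node_id = node['id']
--         label = node.get('label', '')
--         node_type = node.get('type', 'attack')
--
--         if node_type == 'mitigation':
--             # Blue box for mitigation
--             result.append(f"    {node_id}[\"{label}\"]")
--             result.append(f"    style {node_id} {node.get('style', '')}")
--
--             # Link from parent attack step to mitigation
--             parent_id = node.get('parent_id')
--             if parent_id:
--                 result.append(f"    {parent_id} --> {node_id}")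
--
--                 # Find next attack step (sibling of parent)
--                 for next_node in attack_tree.get('nodes', []):
--                     if next_node.get('parent_id') == parent_id and next_node['id'] > node_id:
--                         result.append(f"    {node_id} -.->|mitigates| {next_node['id']}")
--                         break
--         else:
--             # Regular attack step
--             result.append(f"    {node_id}[\"{label}\"]")
--
--     return '\n'.join(result)
-- ===== SOURCE B (Python) =====
-- def enrich_mermaid(mermaid_content: str, attack_tree) -> str:
--     out = []
--     for line in mermaid_content.split('\n'):
--         out.append(line)
--         if line.strip().startswith('graph'):
--             break
--
--     nodes = attack_tree.get('nodes', [])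
--
--     # Offline batch query answering: collect one "next sibling" query per linked
--     # mitigation (grouped by parent id), answer all of them in a single sweep over
--     # the node list, then emit the diagram lines using the answer table.
--     pending = {}  # parent_id -> list of (node index, mitigation id), unanswered
--     for i, node in enumerate(nodes):
--         if node.get('type', 'attack') == 'mitigation' and node.get('parent_id'):
--             pending.setdefault(node['parent_id'], []).append((i, node['id']))
--
--     answer = {}  # node index of the mitigation -> id of its next sibling
--     for node in nodes:
--         p = node.get('parent_id')
--         if p in pending:
--             nid = node['id']
--             remaining = []
--             for q in pending[p]:
--                 if q[1] < nid:
--                     answer[q[0]] = nid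
--                 else:
--                     remaining.append(q)
--             pending[p] = remaining
--
--     for i, node in enumerate(nodes):
--         nid = node['id']
--         out.append(f'    {nid}["{node.get("label", "")}"]')
--         if node.get('type', 'attack') == 'mitigation':
--             out.append(f"    style {nid} {node.get('style', '')}")
--             p = node.get('parent_id')
--             if p:
--                 out.append(f"    {p} --> {nid}")
--                 if i in answer:
--                     out.append(f"    {nid} -.->|mitigates| {answer[i]}")
--     return '\n'.join(out)
-- ===== Notes on version B (the rewrite author's own statement) =====
-- stated objective: alternative
-- what changed: B answers all mitigation next-sibling queries offline: it collects one (index, id) query per linked mitigation grouped by parent, resolves every query in a single sweep over the node list (removing a query the first time a later-id sibling appears), and emits the diagram from the resulting answer table, instead of A's full rescan of all nodes for each mitigation.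
import Mathlib
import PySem

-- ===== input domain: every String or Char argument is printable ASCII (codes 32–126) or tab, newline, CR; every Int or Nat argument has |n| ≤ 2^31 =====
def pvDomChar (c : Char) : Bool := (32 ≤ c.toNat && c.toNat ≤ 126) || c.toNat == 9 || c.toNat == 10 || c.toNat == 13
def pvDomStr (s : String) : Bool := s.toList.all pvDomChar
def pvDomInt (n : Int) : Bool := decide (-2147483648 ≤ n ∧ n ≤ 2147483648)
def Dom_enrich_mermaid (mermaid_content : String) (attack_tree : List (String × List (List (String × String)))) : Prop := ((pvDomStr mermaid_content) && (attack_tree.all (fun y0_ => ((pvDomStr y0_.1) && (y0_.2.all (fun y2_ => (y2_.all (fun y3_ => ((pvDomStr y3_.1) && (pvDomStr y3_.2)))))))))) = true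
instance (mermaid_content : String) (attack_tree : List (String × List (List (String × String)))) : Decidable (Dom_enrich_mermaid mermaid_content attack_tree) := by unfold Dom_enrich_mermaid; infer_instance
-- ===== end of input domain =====

-- B answers every mitigation's "next sibling" query offline: it collects the queries grouped
-- by parent, answers them all in ONE sweep over the node list, and emits from the answer
-- table, instead of A's fresh rescan of all nodes per mitigation; objective: alternative.

-- shared helpers: Python dict lookups on the association lists (first match)
def pvGet (n : List (String × String)) (k : String) : Option String :=
  (PySem.Dict.mk n).get? k

def pvGetD (n : List (String × String)) (k d : String) : String :=
  (pvGet n k).getD d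

-- attack_tree.get('nodes', [])
def pvNodes (attack_tree : List (String × List (List (String × String)))) :
    List (List (String × String)) :=
  ((PySem.Dict.mk attack_tree).get? "nodes").getD []

-- line.strip().startswith('graph')
def pvIsGraph (l : String) : Bool :=
  PySem.Str.startswith (PySem.Str.strip l) "graph"

-- both Pythons' header loop: append each line, break after the first one matching p
def pvTakeThrough (p : String → Bool) : List String → List String
  | [] => []
  | l :: ls => if p l then [l] else l :: pvTakeThrough p ls

-- ===== PORT A =====
-- A's inner scan: first node (in tree order) whose parent_id is p and whose id > m
def pvFindNextA (nodes : List (List (String × String))) (p m : String) : Option String :=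
  match nodes with
  | [] => none
  | n :: ns =>
    if pvGet n "parent_id" == some p
        && PySem.Chars.strLt m.toList (pvGetD n "id" "").toList then
      some (pvGetD n "id" "")
    else pvFindNextA ns p m

-- the lines A appends for one node (rescanning all nodes for a mitigation's next sibling)
def pvEmitA (nodes : List (List (String × String))) (n : List (String × String)) :
    List String :=
  let node_id := pvGetD n "id" ""
  let label := pvGetD n "label" ""
  let node_type := pvGetD n "type" "attack"
  if node_type = "mitigation" then
    ("    " ++ node_id ++ "[\"" ++ label ++ "\"]") ::
    ("    style " ++ node_id ++ " " ++ pvGetD n "style" "") ::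
    (match pvGet n "parent_id" with
     | some p =>
       if p = "" then []
       else
         ("    " ++ p ++ " --> " ++ node_id) ::
         (match pvFindNextA nodes p node_id with
          | some sid => ["    " ++ node_id ++ " -.->|mitigates| " ++ sid]
          | none => [])
     | none => [])
  else ["    " ++ node_id ++ "[\"" ++ label ++ "\"]"]

def enrich_mermaid (mermaid_content : String) (attack_tree : List (String × List (List (String × String)))) : String :=
  let lines := (PySem.Str.split? mermaid_content "\n").getD []  -- sep "\n" ≠ "": never none
  let header := pvTakeThrough pvIsGraph lines
  let nodes := pvNodes attack_tree
  -- node_map is built but never used by A; in Python its only effect is a KeyError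
  -- on a node without 'id' (excluded by Pre_), so this value is dead
  let _node_map := nodes.foldl (fun d n => d.insert (pvGetD n "id" "") n)
    (PySem.Dict.empty : PySem.Dict String (List (String × String)))
  PySem.Str.join "\n" (header ++ nodes.flatMap (pvEmitA nodes))

-- ===== PORT B =====
-- query collection: pending.setdefault(node['parent_id'], []).append((i, node['id']))
def pvPendStep (st : PySem.Dict String (List (Int × String)))
    (pr : Int × List (String × String)) : PySem.Dict String (List (Int × String)) :=
  if pvGetD pr.2 "type" "attack" = "mitigation" then
    match pvGet pr.2 "parent_id" with
    | some p =>
      if p = "" then st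
      else st.insert p (st.getD p [] ++ [(pr.1, pvGetD pr.2 "id" "")])
    | none => st
  else st

def pvPending (nodes : List (List (String × String))) :
    PySem.Dict String (List (Int × String)) :=
  (PySem.List.enumerate nodes).foldl pvPendStep PySem.Dict.empty

-- one iteration of Python B's inner `for q in pending[p]` partition loop
def pvInnerStep (nid : String)
    (acc : List (Int × String) × PySem.Dict Int String) (q : Int × String) :
    List (Int × String) × PySem.Dict Int String :=
  if PySem.Chars.strLt q.2.toList nid.toList then (acc.1, acc.2.insert q.1 nid)
  else (acc.1 ++ [q], acc.2)

-- one node of the answering sweep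
def pvSweepStep
    (st : PySem.Dict String (List (Int × String)) × PySem.Dict Int String)
    (n : List (String × String)) :
    PySem.Dict String (List (Int × String)) × PySem.Dict Int String :=
  match pvGet n "parent_id" with
  | none => st
  | some p =>
    match st.1.get? p with
    | none => st
    | some qs =>
      let nid := pvGetD n "id" ""
      let r := qs.foldl (pvInnerStep nid) ([], st.2)
      (st.1.insert p r.1, r.2)

-- the lines B appends for one node, reading the precomputed answer table
def pvEmitB (ans : PySem.Dict Int String) (i : Int) (n : List (String × String)) :
    List String :=
  let node_id := pvGetD n "id" ""
  ("    " ++ node_id ++ "[\"" ++ pvGetD n "label" "" ++ "\"]") ::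
  (if pvGetD n "type" "attack" = "mitigation" then
    ("    style " ++ node_id ++ " " ++ pvGetD n "style" "") ::
    (match pvGet n "parent_id" with
     | some p =>
       if p = "" then []
       else
         ("    " ++ p ++ " --> " ++ node_id) ::
         (match ans.get? i with
          | some sid => ["    " ++ node_id ++ " -.->|mitigates| " ++ sid]
          | none => [])
     | none => [])
  else [])

def enrich_mermaid_alt (mermaid_content : String) (attack_tree : List (String × List (List (String × String)))) : String :=
  let lines := (PySem.Str.split? mermaid_content "\n").getD []  -- sep "\n" ≠ "": never none
  let header := pvTakeThrough pvIsGraph lines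
  let nodes := pvNodes attack_tree
  let pending := pvPending nodes
  let ans := (nodes.foldl pvSweepStep (pending, PySem.Dict.empty)).2
  PySem.Str.join "\n"
    (header ++ (PySem.List.enumerate nodes).flatMap (fun pr => pvEmitB ans pr.1 pr.2))

-- ===== PRECONDITION & SPEC =====
-- Pre_ excludes exactly the inputs where the Python raises KeyError: some node in
-- attack_tree['nodes'] has no 'id' key (A's n['id'] in the node_map comprehension raises).
def Pre_enrich_mermaid (mermaid_content : String) (attack_tree : List (String × List (List (String × String)))) : Prop :=
  ∀ n ∈ pvNodes attack_tree, (pvGet n "id").isSome = true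

instance (mermaid_content : String) (attack_tree : List (String × List (List (String × String)))) : Decidable (Pre_enrich_mermaid mermaid_content attack_tree) := by
  unfold Pre_enrich_mermaid; infer_instance

def pvWitness_enrich_mermaid : String × (List (String × List (List (String × String)))) :=
  ("graph TD", [("nodes",
    [[("id", "A1"), ("label", "Step 1")],
     [("id", "M1"), ("type", "mitigation"), ("parent_id", "A1"), ("style", "fill:#00f")],
     [("id", "Z2"), ("parent_id", "A1"), ("label", "Step 2")]])])

def Spec_enrich_mermaid (mermaid_content : String) (attack_tree : List (String × List (List (String × String)))) (out : String) : Prop := out = enrich_mermaid_alt mermaid_content attack_tree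
instance (mermaid_content : String) (attack_tree : List (String × List (List (String × String)))) (out : String) : Decidable (Spec_enrich_mermaid mermaid_content attack_tree out) := by unfold Spec_enrich_mermaid; infer_instance

-- ===== CLAIM (what is proved, stated in full; the proofs are below) =====
def Claim_equal_enrich_mermaid : Prop := ∀ (mermaid_content : String) (attack_tree : List (String × List (List (String × String)))), Dom_enrich_mermaid mermaid_content attack_tree → Pre_enrich_mermaid mermaid_content attack_tree → Spec_enrich_mermaid mermaid_content attack_tree (enrich_mermaid mermaid_content attack_tree)

-- ===== LEMMAS AND PROOFS =====

-- the answer-table component of the inner partition loop, in isolation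
def pvAnsStep (nid : String) (d : PySem.Dict Int String) (q : Int × String) :
    PySem.Dict Int String :=
  if PySem.Chars.strLt q.2.toList nid.toList then d.insert q.1 nid else d

-- the inner loop = (kept queries, answer inserts): the two accumulators are independent
theorem inner_fold_eq (nid : String) (qs : List (Int × String))
    (a : List (Int × String)) (b : PySem.Dict Int String) :
    qs.foldl (pvInnerStep nid) (a, b) =
      (a ++ qs.filter (fun q => !PySem.Chars.strLt q.2.toList nid.toList),
       qs.foldl (pvAnsStep nid) b) := by
  induction qs generalizing a b with
  | nil => simp
  | cons q qs ih =>
    by_cases h : PySem.Chars.strLt q.2.toList nid.toList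
    · simp [pvInnerStep, pvAnsStep, h, ih]
    · simp [pvInnerStep, pvAnsStep, h, ih]

-- the answer inserts never touch index i when no query for i is answerable here
theorem ansFold_none (nid : String) (qs : List (Int × String))
    (b : PySem.Dict Int String) (i : Int)
    (h : ∀ q ∈ qs, q.1 = i → PySem.Chars.strLt q.2.toList nid.toList = false) :
    (qs.foldl (pvAnsStep nid) b).get? i = b.get? i := by
  induction qs generalizing b with
  | nil => rfl
  | cons q qs ih =>
    rw [List.foldl_cons, ih _ (fun q' hq' => h q' (List.mem_cons_of_mem _ hq'))]
    unfold pvAnsStep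
    by_cases hlt : PySem.Chars.strLt q.2.toList nid.toList
    · have hne : i ≠ q.1 := by
        intro he; have := h q List.mem_cons_self he.symm; simp [hlt] at this
      simp [hlt, PySem.Dict.get?_insert_of_ne _ _ hne]
    · simp [hlt]

-- once answerable (or already answered with nid), index i ends up mapped to nid
theorem ansFold_some (nid : String) (qs : List (Int × String))
    (b : PySem.Dict Int String) (i : Int)
    (h : b.get? i = some nid ∨
         ∃ q ∈ qs, q.1 = i ∧ PySem.Chars.strLt q.2.toList nid.toList = true) :
    (qs.foldl (pvAnsStep nid) b).get? i = some nid := by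
  induction qs generalizing b with
  | nil =>
    rcases h with h | ⟨q, hq, _⟩
    · exact h
    · simp at hq
  | cons q qs ih =>
    rw [List.foldl_cons]
    apply ih
    unfold pvAnsStep
    by_cases hlt : PySem.Chars.strLt q.2.toList nid.toList
    · by_cases hqi : q.1 = i
      · left; simp [hlt, hqi, PySem.Dict.get?_insert_self]
      · rcases h with h | ⟨q', hq', hqi', hlt'⟩
        · left; simpa [hlt, PySem.Dict.get?_insert_of_ne _ _ (Ne.symm hqi)] using h
        · rcases List.mem_cons.1 hq' with rfl | hq'
          · exact absurd hqi' hqi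
          · right; exact ⟨q', hq', hqi', hlt'⟩
    · rcases h with h | ⟨q', hq', hqi', hlt'⟩
      · left; simpa [hlt] using h
      · rcases List.mem_cons.1 hq' with rfl | hq'
        · rw [hlt'] at hlt; exact absurd rfl hlt
        · right; exact ⟨q', hq', hqi', hlt'⟩


-- case-selected forms of one sweep step
theorem sweepStep_no_parent (st : PySem.Dict String (List (Int × String)) × PySem.Dict Int String)
    (n : List (String × String)) (h : pvGet n "parent_id" = none) :
    pvSweepStep st n = st := by
  unfold pvSweepStep; rw [h]

theorem sweepStep_no_key (st : PySem.Dict String (List (Int × String)) × PySem.Dict Int String)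
    (n : List (String × String)) (p : String)
    (hp : pvGet n "parent_id" = some p) (hq : st.1.get? p = none) :
    pvSweepStep st n = st := by
  unfold pvSweepStep; simp only [hp, hq]

theorem sweepStep_hit (st : PySem.Dict String (List (Int × String)) × PySem.Dict Int String)
    (n : List (String × String)) (p : String) (qs : List (Int × String))
    (hp : pvGet n "parent_id" = some p) (hq : st.1.get? p = some qs) :
    pvSweepStep st n =
      (st.1.insert p
        (qs.filter (fun q => !PySem.Chars.strLt q.2.toList (pvGetD n "id" "").toList)),
       qs.foldl (pvAnsStep (pvGetD n "id" "")) st.2) := by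
  unfold pvSweepStep; simp only [hp, hq]; simp [inner_fold_eq]

-- once index i occurs in no pending group, the rest of the sweep leaves ans[i] alone
theorem sweep_dead (ns : List (List (String × String)))
    (pend : PySem.Dict String (List (Int × String))) (ans : PySem.Dict Int String)
    (i : Int)
    (h : ∀ p qs, pend.get? p = some qs → ∀ q ∈ qs, q.1 ≠ i) :
    (ns.foldl pvSweepStep (pend, ans)).2.get? i = ans.get? i := by
  induction ns generalizing pend ans with
  | nil => rfl
  | cons n ns ih =>
    rw [List.foldl_cons]
    cases hp : pvGet n "parent_id" with
    | none => rw [sweepStep_no_parent _ _ hp]; exact ih pend ans h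
    | some p =>
      cases hq : pend.get? p with
      | none => rw [sweepStep_no_key _ _ p hp hq]; exact ih pend ans h
      | some qs =>
        rw [sweepStep_hit _ _ p qs hp hq]
        rw [ih]
        · exact ansFold_none _ _ _ _
            (fun q hq' hqi => absurd hqi (h p qs hq q hq'))
        · intro pg qsg hqg q hmemq
          by_cases hpg : pg = p
          · subst hpg
            rw [PySem.Dict.get?_insert_self] at hqg
            cases hqg
            exact h pg qs hq q (List.mem_filter.1 hmemq).1
          · rw [PySem.Dict.get?_insert_of_ne _ _ hpg] at hqg
            exact h pg qsg hqg q hmemq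

-- the live-query invariant: while (i, m)'s query is pending in group P (and i occurs
-- nowhere else), the sweep's final answer for i is the first matching sibling in ns
theorem sweep_alive (ns : List (List (String × String)))
    (pend : PySem.Dict String (List (Int × String))) (ans : PySem.Dict Int String)
    (P : String) (i : Int) (m : String)
    (hmem : (i, m) ∈ pend.getD P [])
    (hans : ans.get? i = none)
    (huniq : ∀ p' qs, pend.get? p' = some qs → ∀ q ∈ qs, q.1 = i → p' = P ∧ q.2 = m) :
    (ns.foldl pvSweepStep (pend, ans)).2.get? i =
      ((ns.filter (fun n => pvGet n "parent_id" == some P)).map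
        (fun n => pvGetD n "id" "")).find?
          (fun sid => PySem.Chars.strLt m.toList sid.toList) := by
  induction ns generalizing pend ans with
  | nil => simpa using hans
  | cons n ns ih =>
    have hkey : ∃ qs0, pend.get? P = some qs0 ∧ (i, m) ∈ qs0 := by
      cases hg : pend.get? P with
      | none => rw [PySem.Dict.getD_eq_get?_getD, hg] at hmem; simp at hmem
      | some qs0 =>
        rw [PySem.Dict.getD_eq_get?_getD, hg] at hmem; exact ⟨qs0, rfl, hmem⟩
    obtain ⟨qs0, hg0, hm0⟩ := hkey
    rw [List.foldl_cons, List.filter_cons]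
    cases hp : pvGet n "parent_id" with
    | none =>
      rw [if_neg (by simp), sweepStep_no_parent _ _ hp]
      exact ih pend ans hmem hans huniq
    | some p' =>
      cases hq : pend.get? p' with
      | none =>
        have hne : p' ≠ P := fun he => by rw [he, hg0] at hq; cases hq
        rw [if_neg (by simp [hne]), sweepStep_no_key _ _ p' hp hq]
        exact ih pend ans hmem hans huniq
      | some qs =>
        rw [sweepStep_hit _ _ p' qs hp hq]
        by_cases hpp : p' = P
        · subst hpp
          rw [hg0] at hq
          injection hq with hq; subst hq
          rw [if_pos (by simp)]
          simp only [List.map_cons, List.find?_cons]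
          by_cases hlt : PySem.Chars.strLt m.toList (pvGetD n "id" "").toList
          · -- answered here: ans[i] = nid, i disappears from every group
            rw [hlt]
            rw [sweep_dead]
            · exact ansFold_some _ _ _ _ (Or.inr ⟨(i, m), hm0, rfl, hlt⟩)
            · intro pg qsg hqg q hqmem hqi
              by_cases hpg : pg = p'
              · subst hpg
                rw [PySem.Dict.get?_insert_self] at hqg
                injection hqg with hqg; subst hqg
                obtain ⟨hmemq, hkeep⟩ := List.mem_filter.1 hqmem
                have := (huniq pg qs0 hg0 q hmemq hqi).2
                rw [this] at hkeep; simp [hlt] at hkeep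
              · rw [PySem.Dict.get?_insert_of_ne _ _ hpg] at hqg
                exact absurd (huniq pg qsg hqg q hqmem hqi).1 hpg
          · -- not yet answerable: (i, m) stays pending, head candidate fails the test
            have hltf : PySem.Chars.strLt m.toList (pvGetD n "id" "").toList = false := by
              simpa using hlt
            rw [hltf]
            rw [ih]
            · rw [PySem.Dict.getD_eq_get?_getD, PySem.Dict.get?_insert_self]
              simp only [Option.getD_some]
              exact List.mem_filter.2 ⟨hm0, by simpa using hlt⟩
            · rw [ansFold_none]
              · exact hans
              · intro q hqmem hqi
                rw [(huniq p' qs0 hg0 q hqmem hqi).2]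
                exact hltf
            · intro pg qsg hqg q hqmem hqi
              by_cases hpg : pg = p'
              · subst hpg
                rw [PySem.Dict.get?_insert_self] at hqg
                injection hqg with hqg; subst hqg
                exact huniq pg qs0 hg0 q (List.mem_filter.1 hqmem).1 hqi
              · rw [PySem.Dict.get?_insert_of_ne _ _ hpg] at hqg
                exact huniq pg qsg hqg q hqmem hqi
        · -- a foreign group: group P untouched, ans[i] untouched
          rw [if_neg (by simp [hpp])]
          rw [ih]
          · rw [PySem.Dict.getD_eq_get?_getD, PySem.Dict.get?_insert_of_ne _ _ (fun h => hpp h.symm),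
              ← PySem.Dict.getD_eq_get?_getD]
            exact hmem
          · rw [ansFold_none]
            · exact hans
            · intro q hqmem hqi
              exact absurd (huniq p' qs hq q hqmem hqi).1 hpp
          · intro pg qsg hqg q hqmem hqi
            by_cases hpg : pg = p'
            · subst hpg
              rw [PySem.Dict.get?_insert_self] at hqg
              injection hqg with hqg; subst hqg
              exact huniq pg qs hq q (List.mem_filter.1 hqmem).1 hqi
            · rw [PySem.Dict.get?_insert_of_ne _ _ hpg] at hqg
              exact huniq pg qsg hqg q hqmem hqi

-- A's rescan returns the first id > m among the nodes with parent_id p, in tree order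
theorem pvFindNextA_eq (nodes : List (List (String × String))) (p m : String) :
    pvFindNextA nodes p m =
      ((nodes.filter (fun n => pvGet n "parent_id" == some p)).map
        (fun n => pvGetD n "id" "")).find?
          (fun sid => PySem.Chars.strLt m.toList sid.toList) := by
  induction nodes with
  | nil => rfl
  | cons n ns ih =>
    rw [pvFindNextA, List.filter_cons]
    by_cases hp : (pvGet n "parent_id" == some p) = true
    · simp only [hp, Bool.true_and, if_pos, List.map_cons, List.find?_cons]
      by_cases hlt : PySem.Chars.strLt m.toList (pvGetD n "id" "").toList
      · simp [hlt]
      · simp [hlt, ih]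
    · simp only [hp, Bool.false_and, Bool.false_eq_true, if_false]
      simpa using ih

-- which enumerated nodes carry a query aimed at parent p
def pvQTo (p : String) (pr : Int × List (String × String)) : Bool :=
  (pvGetD pr.2 "type" "attack" == "mitigation") &&
  (match pvGet pr.2 "parent_id" with
   | some p' => !(p' == "") && (p' == p)
   | none => false)

-- the collection fold groups, per parent p, exactly the queries aimed at p, in order
theorem pending_fold_getD (l : List (Int × List (String × String)))
    (d : PySem.Dict String (List (Int × String))) (p : String) :
    (l.foldl pvPendStep d).getD p [] =
      d.getD p [] ++ (l.filter (pvQTo p)).map (fun pr => (pr.1, pvGetD pr.2 "id" "")) := by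
  induction l generalizing d with
  | nil => simp
  | cons pr l ih =>
    rw [List.foldl_cons, List.filter_cons]
    by_cases ht : pvGetD pr.2 "type" "attack" = "mitigation"
    · cases hp : pvGet pr.2 "parent_id" with
      | none => simp [pvPendStep, pvQTo, ht, hp, ih]
      | some p' =>
        by_cases hpe : p' = ""
        · simp [pvPendStep, pvQTo, ht, hp, hpe, ih]
        · by_cases hpp : p' = p
          · subst hpp
            simp [pvPendStep, pvQTo, ht, hp, hpe, ih, PySem.Dict.getD_insert_self]
          · simp [pvPendStep, pvQTo, ht, hp, hpe, hpp, ih,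
              PySem.Dict.getD_insert, (Ne.symm hpp : p ≠ p')]
    · simp [pvPendStep, pvQTo, ht, ih]

theorem pending_getD (nodes : List (List (String × String))) (p : String) :
    (pvPending nodes).getD p [] =
      ((PySem.List.enumerate nodes).filter (pvQTo p)).map
        (fun pr => (pr.1, pvGetD pr.2 "id" "")) := by
  unfold pvPending
  rw [pending_fold_getD]
  simp

-- the answer table agrees with A's per-mitigation rescan
theorem ans_get (nodes : List (List (String × String))) (i : Int)
    (n : List (String × String)) (p : String)
    (hn : (i, n) ∈ PySem.List.enumerate nodes)
    (hmit : pvGetD n "type" "attack" = "mitigation")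
    (hp : pvGet n "parent_id" = some p) (hpne : p ≠ "") :
    (nodes.foldl pvSweepStep (pvPending nodes, PySem.Dict.empty)).2.get? i =
      pvFindNextA nodes p (pvGetD n "id" "") := by
  have hqto : pvQTo p (i, n) = true := by
    simp [pvQTo, hmit, hp, hpne]
  have hmem : (i, pvGetD n "id" "") ∈ (pvPending nodes).getD p [] := by
    rw [pending_getD]
    exact List.mem_map.2 ⟨(i, n), List.mem_filter.2 ⟨hn, hqto⟩, rfl⟩
  rw [pvFindNextA_eq]
  apply sweep_alive nodes (pvPending nodes) PySem.Dict.empty p i (pvGetD n "id" "")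
    hmem (PySem.Dict.get?_empty _)
  intro p' qs hq q hqmem hqi
  have hqs : (pvPending nodes).getD p' [] = qs := by
    rw [PySem.Dict.getD_eq_get?_getD, hq]; rfl
  rw [← hqs, pending_getD] at hqmem
  obtain ⟨pr, hprmem, hpr⟩ := List.mem_map.1 hqmem
  obtain ⟨hpre, hprq⟩ := List.mem_filter.1 hprmem
  -- pr is the enumerated entry at index i, i.e. the very node n
  obtain ⟨k, hk, hkeq⟩ := (PySem.List.mem_enumerate_iff _ _ _).1 hpre
  obtain ⟨k', hk', hkeq'⟩ := (PySem.List.mem_enumerate_iff _ _ _).1 hn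
  have hik : pr.1 = (k : Int) := by rw [hkeq]; simp
  have hik' : i = (k' : Int) := by
    have := congrArg Prod.fst hkeq'; simpa using this
  rw [← hpr] at hqi
  simp only at hqi
  have hkk : k = k' := by
    have h : (k : Int) = (k' : Int) := by rw [← hik, hqi, hik']
    exact_mod_cast h
  have hprn : pr.2 = n := by
    have h1 : pr.2 = nodes[k] := by rw [hkeq]
    have h2 : n = nodes[k'] := by
      have := congrArg Prod.snd hkeq'; simpa using this
    subst hkk
    rw [h1, h2]
  simp only [pvQTo, hprn, hp] at hprq
  obtain ⟨-, h2⟩ := (Bool.and_eq_true _ _).mp hprq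
  obtain ⟨-, h3⟩ := (Bool.and_eq_true _ _).mp h2
  have hpp : p' = p := by
    have h4 : p = p' := by simpa using h3
    exact h4.symm
  refine ⟨hpp, ?_⟩
  rw [← hpr]
  simp [hprn]

-- per enumerated node, A's emitted lines equal B's
theorem emit_eq (nodes : List (List (String × String))) (i : Int)
    (n : List (String × String)) (hn : (i, n) ∈ PySem.List.enumerate nodes) :
    pvEmitA nodes n =
      pvEmitB (nodes.foldl pvSweepStep (pvPending nodes, PySem.Dict.empty)).2 i n := by
  unfold pvEmitA pvEmitB
  by_cases ht : pvGetD n "type" "attack" = "mitigation"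
  · simp only [ht, if_pos]
    cases hp : pvGet n "parent_id" with
    | none => rfl
    | some p =>
      by_cases hpe : p = ""
      · simp [hpe]
      · simp [hpe, ans_get nodes i n p hn ht hp hpe]
  · simp [ht]

-- a flatMap over enumerate collapses to a flatMap over the list itself
theorem flatMap_enumerate {α β : Type} (l : List α) (s : Int)
    (g : Int × α → List β) (f : α → List β)
    (h : ∀ pr ∈ PySem.List.enumerate l s, g pr = f pr.2) :
    (PySem.List.enumerate l s).flatMap g = l.flatMap f := by
  induction l generalizing s with
  | nil => simp [PySem.List.enumerate_nil]
  | cons x xs ih =>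
    rw [PySem.List.enumerate_cons, List.flatMap_cons, List.flatMap_cons]
    rw [h (s, x) (by rw [PySem.List.enumerate_cons]; exact List.mem_cons_self)]
    rw [ih (s + 1) (fun pr hpr => h pr
      (by rw [PySem.List.enumerate_cons]; exact List.mem_cons_of_mem _ hpr))]

-- ===== VERDICT (by name: the statement is the Claim_ definition above) =====
theorem enrich_mermaid_spec : Claim_equal_enrich_mermaid := by
  intro mermaid_content attack_tree _ _
  unfold Spec_enrich_mermaid enrich_mermaid enrich_mermaid_alt
  dsimp only
  congr 1
  congr 1
  rw [flatMap_enumerate (pvNodes attack_tree) 0 _ (pvEmitA (pvNodes attack_tree))]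
  intro pr hpr
  exact (emit_eq (pvNodes attack_tree) pr.1 pr.2 (by simpa using hpr)).symm
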